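-- pv_equiv track=rewrite | github.com/diviprog/adventofcode24 | 12/part2.py | find_regions_by_sides
-- ===== SOURCE A (Python) =====
-- from collections import defaultdict, deque
-- from typing import Set, Tuple, List, Dict, Set
--
-- def find_regions_by_sides(grid: List[str]) -> int:
--     rows, cols = len(grid), len(grid[0])
--     visited = set()
--     regions = defaultdict(list)
--
--     def get_sides(points: Set[Tuple[int, int]]) -> int:
--         segments = set()
--         for r, c in points:
--             for dr, dc in [(1,0), (-1,0), (0,1), (0,-1)]:
--                 nr, nc = r + dr, c + dc
--                 if (nr, nc) not in points:
--                     if dc == 0: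
--                         if dr == 1:
--                             segments.add(((r+1, c), 'h'))
--                         else:
--                             segments.add(((r, c), 'h'))
--                     else:
--                         if dc == 1:
--                             segments.add(((r, c+1), 'v'))
--                         else:
--                             segments.add(((r, c), 'v'))
--
--         sides = 0
--         remaining = segments.copy()
--
--         while remaining:
--             current = remaining.pop()
--             sides += 1
--
--             if current[1] == 'h':
--                 r, c = current[0]
--                 pos = r, c + 1
--                 while ((pos, 'h')) in remaining:
--                     remaining.remove((pos, 'h'))
--                     pos = (pos[0], pos[1] + 1)
--
--                 pos = r, c - 1
--                 while ((pos, 'h')) in remaining: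
--                     remaining.remove((pos, 'h'))
--                     pos = (pos[0], pos[1] - 1)
--
--             else:
--                 r, c = current[0]
--                 pos = r + 1, c
--                 while ((pos, 'v')) in remaining:
--                     remaining.remove((pos, 'v'))
--                     pos = (pos[0] + 1, pos[1])
--
--                 pos = r - 1, c
--                 while ((pos, 'v')) in remaining:
--                     remaining.remove((pos, 'v'))
--                     pos = (pos[0] - 1, pos[1])
--
--         return sides
--
--     def flood_fill(r, c, plant_type):
--         if (r, c) in visited or r < 0 or r >= rows or c < 0 or c >= cols or grid[r][c] != plant_type:
--             return 0, set()
--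
--         visited.add((r, c))
--         points = {(r, c)}
--
--         for dr, dc in [(1,0), (-1,0), (0,1), (0,-1)]:
--             area, new_points = flood_fill(r + dr, c + dc, plant_type)
--             points.update(new_points)
--
--         return len(points), points
--
--     for r in range(rows):
--         for c in range(cols):
--             if (r, c) not in visited:
--                 plant_type = grid[r][c]
--                 area, points = flood_fill(r, c, plant_type)
--                 if area > 0:
--                     sides = get_sides(points)
--                     regions[plant_type].append((area, sides))
--
--     total_price = 0
--     for plant_type, region_list in regions.items():
--         for area, sides in region_list:
--             price = area * sides
--             total_price += price
--
--     return total_price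
-- ===== SOURCE B (Python) =====
-- from typing import Set, Tuple, List
--
-- def find_regions_by_sides(grid: List[str]) -> int:
--     rows, cols = len(grid), len(grid[0])
--     visited = set()
--
--     def get_sides(points: Set[Tuple[int, int]]) -> int:
--         segments = set()
--         for r, c in points:
--             for dr, dc in [(1,0), (-1,0), (0,1), (0,-1)]:
--                 if (r + dr, c + dc) not in points:
--                     if dc == 0:
--                         segments.add(((r + 1, c) if dr == 1 else (r, c), 'h'))
--                     else:
--                         segments.add(((r, c + 1) if dc == 1 else (r, c), 'v'))
--         # A side is a maximal run of collinear adjacent segments; count each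
--         # run once, at its first segment (the one whose predecessor is absent).
--         sides = 0
--         for (r, c), o in segments:
--             prev = ((r, c - 1), 'h') if o == 'h' else ((r - 1, c), 'v')
--             if prev not in segments:
--                 sides += 1
--         return sides
--
--     def flood_fill(r, c, plant_type):
--         if (r, c) in visited or r < 0 or r >= rows or c < 0 or c >= cols or grid[r][c] != plant_type:
--             return 0, set()
--         visited.add((r, c))
--         points = {(r, c)}
--         for dr, dc in [(1,0), (-1,0), (0,1), (0,-1)]:
--             area, new_points = flood_fill(r + dr, c + dc, plant_type)
--             points.update(new_points)
--         return len(points), points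
--
--     total_price = 0
--     for r in range(rows):
--         for c in range(cols):
--             if (r, c) not in visited:
--                 area, points = flood_fill(r, c, grid[r][c])
--                 total_price += area * get_sides(points)
--     return total_price
-- ===== Notes on version B (the rewrite author's own statement) =====
-- stated objective: simpler
-- what changed: get_sides no longer merges collinear boundary segments with a destructive worklist (pop + strip runs in both directions); B counts each maximal run once in a single pass by counting segments whose predecessor segment is absent, and the per-plant-type regions dict is dropped in favour of accumulating area*sides directly.
import Mathlib
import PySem

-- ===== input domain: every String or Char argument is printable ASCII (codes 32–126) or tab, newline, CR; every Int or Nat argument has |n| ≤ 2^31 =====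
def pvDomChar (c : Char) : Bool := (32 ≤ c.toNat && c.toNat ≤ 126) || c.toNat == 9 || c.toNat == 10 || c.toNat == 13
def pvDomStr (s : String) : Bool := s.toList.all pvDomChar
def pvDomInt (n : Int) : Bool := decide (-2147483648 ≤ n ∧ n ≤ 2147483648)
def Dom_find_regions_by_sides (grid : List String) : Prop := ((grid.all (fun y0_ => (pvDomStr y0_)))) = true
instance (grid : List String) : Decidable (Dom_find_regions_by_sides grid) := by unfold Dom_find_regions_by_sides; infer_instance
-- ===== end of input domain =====

-- B replaces A's destructive worklist merging of collinear boundary segments by a one-pass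
-- count of run-start segments (predecessor absent), and drops the per-plant-type dict,
-- accumulating area*sides directly; flood fill and segment building are shared verbatim.

-- ===== PORT A =====
-- helpers shared by BOTH ports: both Python sources contain this flood fill and this
-- segment-building loop verbatim.
def pvDirs : List (Int × Int) := [(1,0), (-1,0), (0,1), (0,-1)]

-- grid[r][c]; default ' ' is returned only where Python raises IndexError (outside Pre_).
def pvCharAt (grid : List String) (r c : Int) : Char :=
  (PySem.Str.pyGet? (PySem.List.pyGetD grid r "") c).getD ' '

-- recursive flood_fill; mutable `visited` threaded through, fuel = cells+1 (never exhausted: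
-- every recursive call is made after `visited` grew, so depth ≤ cells+1; at fuel 0 the guard
-- would hold anyway and the same value is returned).
def pvFloodFill (grid : List String) (rows cols : Int) :
    Nat → Int → Int → Char → PySem.Set (Int × Int) → (Int × PySem.Set (Int × Int)) × PySem.Set (Int × Int)
  | 0, _, _, _, visited => ((0, PySem.Set.empty), visited)
  | fuel+1, r, c, t, visited =>
    if (r, c) ∈ visited ∨ r < 0 ∨ rows ≤ r ∨ c < 0 ∨ cols ≤ c ∨ pvCharAt grid r c ≠ t then
      ((0, PySem.Set.empty), visited)
    else
      let visited1 := PySem.Set.add visited (r, c)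
      let start : PySem.Set (Int × Int) := [(r, c)]
      let pv := pvDirs.foldl
        (fun (pv : PySem.Set (Int × Int) × PySem.Set (Int × Int)) d =>
          let res := pvFloodFill grid rows cols fuel (r + d.1) (c + d.2) t pv.2
          (PySem.Set.update pv.1 res.1.2, res.2))
        (start, visited1)
      ((PySem.List.len pv.1, pv.1), pv.2)

-- the `segments` set both get_sides variants build from a region's points
def pvSegments (points : List (Int × Int)) : PySem.Set ((Int × Int) × Char) :=
  points.foldl (fun segs p =>
    pvDirs.foldl (fun segs d =>
      if (p.1 + d.1, p.2 + d.2) ∈ points then segs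
      else
        PySem.Set.add segs
          (if d.2 = 0 then
             (if d.1 = 1 then ((p.1 + 1, p.2), 'h') else ((p.1, p.2), 'h'))
           else
             (if d.2 = 1 then ((p.1, p.2 + 1), 'v') else ((p.1, p.2), 'v')))) segs)
    PySem.Set.empty

-- A's inner `while ((pos, o)) in remaining: remaining.remove(...)` loop
-- (List.erase of a present element = Python set.remove; the list is nodup).
def pvStrip (o : Char) (dr dc : Int) (r c : Int) (rem : List ((Int × Int) × Char)) :
    List ((Int × Int) × Char) :=
  if _h : ((r, c), o) ∈ rem then
    pvStrip o dr dc (r + dr) (c + dc) (rem.erase ((r, c), o))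
  else rem
termination_by rem.length
decreasing_by
  have h1 := List.length_erase_of_mem _h
  have h2 := List.length_pos_of_mem _h
  omega

theorem pvStrip_sublist (o : Char) (dr dc : Int) :
    ∀ (r c : Int) (rem : List ((Int × Int) × Char)), (pvStrip o dr dc r c rem).Sublist rem := by
  intro r c rem
  fun_induction pvStrip with
  | case1 r c rem h ih => exact ih.trans (List.erase_sublist)
  | case2 r c rem h => exact List.Sublist.refl _

-- A's outer `while remaining:` loop; set.pop is ported as taking the first element
-- (the final count is independent of the pop order — that is what the proof shows).
def pvMergeLoop : List ((Int × Int) × Char) → Int → Int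
  | [], sides => sides
  | cur :: rest, sides =>
    let rem2 :=
      if cur.2 = 'h' then
        pvStrip 'h' 0 (-1) cur.1.1 (cur.1.2 - 1) (pvStrip 'h' 0 1 cur.1.1 (cur.1.2 + 1) rest)
      else
        pvStrip 'v' (-1) 0 (cur.1.1 - 1) cur.1.2 (pvStrip 'v' 1 0 (cur.1.1 + 1) cur.1.2 rest)
    pvMergeLoop rem2 (sides + 1)
termination_by rem _ => rem.length
decreasing_by
  have h1 := (pvStrip_sublist 'h' 0 (-1) cur.1.1 (cur.1.2 - 1) (pvStrip 'h' 0 1 cur.1.1 (cur.1.2 + 1) rest)).length_le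
  have h2 := (pvStrip_sublist 'h' 0 1 cur.1.1 (cur.1.2 + 1) rest).length_le
  have h3 := (pvStrip_sublist 'v' (-1) 0 (cur.1.1 - 1) cur.1.2 (pvStrip 'v' 1 0 (cur.1.1 + 1) cur.1.2 rest)).length_le
  have h4 := (pvStrip_sublist 'v' 1 0 (cur.1.1 + 1) cur.1.2 rest).length_le
  split <;> [skip; skip] <;> simp only [List.length_cons] <;> omega

def pvGetSidesA (points : List (Int × Int)) : Int := pvMergeLoop (pvSegments points) 0

def find_regions_by_sides (grid : List String) : Int :=
  let rows : Int := PySem.List.len grid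
  let cols : Int := PySem.Str.len (PySem.List.pyGetD grid 0 "")  -- grid[0] raises on []: outside Pre_
  let st := (PySem.List.pyRange 0 rows 1).foldl (fun st r =>
      (PySem.List.pyRange 0 cols 1).foldl
        (fun (st : PySem.Set (Int × Int) × PySem.Dict Char (List (Int × Int))) c =>
          if (r, c) ∈ st.1 then st
          else
            let t := pvCharAt grid r c
            let res := pvFloodFill grid rows cols (rows.toNat * cols.toNat + 1) r c t st.1
            if 0 < res.1.1 then
              (res.2, st.2.modify t [] (fun l => l ++ [(res.1.1, pvGetSidesA res.1.2)]))
            else (res.2, st.2)) st)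
    (PySem.Set.empty, PySem.Dict.empty)
  st.2.items.foldl (fun tot kv => kv.2.foldl (fun tot p => tot + p.1 * p.2) tot) 0

-- ===== PORT B =====
-- predecessor of a segment along its own line (Source B's `prev`)
def pvSegPred (s : (Int × Int) × Char) : (Int × Int) × Char :=
  if s.2 = 'h' then ((s.1.1, s.1.2 - 1), 'h') else ((s.1.1 - 1, s.1.2), 'v')

-- one pass: a side = a maximal run of collinear adjacent segments, counted at its
-- first segment (the one whose predecessor is absent)
def pvGetSidesB (points : List (Int × Int)) : Int :=
  let segs := pvSegments points
  segs.foldl (fun sides s => if pvSegPred s ∉ segs then sides + 1 else sides) 0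

def find_regions_by_sides_alt (grid : List String) : Int :=
  let rows : Int := PySem.List.len grid
  let cols : Int := PySem.Str.len (PySem.List.pyGetD grid 0 "")
  let st := (PySem.List.pyRange 0 rows 1).foldl (fun st r =>
      (PySem.List.pyRange 0 cols 1).foldl
        (fun (st : PySem.Set (Int × Int) × Int) c =>
          if (r, c) ∈ st.1 then st
          else
            let t := pvCharAt grid r c
            let res := pvFloodFill grid rows cols (rows.toNat * cols.toNat + 1) r c t st.1
            (res.2, st.2 + res.1.1 * pvGetSidesB res.1.2)) st)
    (PySem.Set.empty, 0)
  st.2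

-- ===== PRECONDITION & SPEC =====
-- Pre_ excludes exactly the inputs where the Python raises IndexError: the empty grid
-- (grid[0]) and grids with a row shorter than row 0 (grid[r][c] for c < len(grid[0])).
def Pre_find_regions_by_sides (grid : List String) : Prop :=
  grid ≠ [] ∧ ∀ s ∈ grid, PySem.Str.len (PySem.List.pyGetD grid 0 "") ≤ PySem.Str.len s

instance (grid : List String) : Decidable (Pre_find_regions_by_sides grid) := by
  unfold Pre_find_regions_by_sides; infer_instance

def pvWitness_find_regions_by_sides : List String := ["AAB", "ABB"]

def Spec_find_regions_by_sides (grid : List String) (out : Int) : Prop :=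
  out = find_regions_by_sides_alt grid

instance (grid : List String) (out : Int) : Decidable (Spec_find_regions_by_sides grid out) := by
  unfold Spec_find_regions_by_sides; infer_instance

-- ===== CLAIM (what is proved, stated in full; the proofs are below) =====
def Claim_equal_find_regions_by_sides : Prop :=
  ∀ (grid : List String), Dom_find_regions_by_sides grid → Pre_find_regions_by_sides grid →
    Spec_find_regions_by_sides grid (find_regions_by_sides grid)

-- ===== LEMMAS AND PROOFS =====

abbrev PvSeg := (Int × Int) × Char

-- segment i steps along an axis line through (r0,c0), orientation o
def pvAx (o : Char) (r0 c0 : Int) (i : Int) : PvSeg :=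
  if o = 'h' then ((r0, c0 + i), 'h') else ((r0 + i, c0), 'v')

theorem pvAx_inj {o : Char} {r0 c0 i j : Int} (h : pvAx o r0 c0 i = pvAx o r0 c0 j) : i = j := by
  by_cases ho : o = 'h' <;> simp [pvAx, ho, Prod.ext_iff] at h <;> omega

theorem pvSegPred_pvAx (o : Char) (ho : o = 'h' ∨ o = 'v') (r0 c0 i : Int) :
    pvSegPred (pvAx o r0 c0 i) = pvAx o r0 c0 (i - 1) := by
  rcases ho with ho | ho <;> subst ho
  · simp [pvAx, pvSegPred]; ring_nf
  · simp [pvAx, pvSegPred, show ('v':Char) ≠ 'h' by decide]; ring_nf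

theorem pvSegPred_eq_pvAx_iff {s : PvSeg} (hs : s.2 = 'h' ∨ s.2 = 'v') {o : Char}
    (ho : o = 'h' ∨ o = 'v') {r0 c0 i : Int} :
    pvSegPred s = pvAx o r0 c0 i ↔ s = pvAx o r0 c0 (i + 1) := by
  constructor
  · intro h
    obtain ⟨⟨sr, sc⟩, sch⟩ := s
    rcases ho with ho | ho <;> subst ho <;>
      rcases hs with hs | hs <;> simp at hs <;> subst hs <;>
      simp [pvSegPred, pvAx, Prod.ext_iff] at h ⊢ <;> omega
  · intro h
    subst h
    rw [pvSegPred_pvAx o ho]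
    congr 1
    omega

theorem pvStrip_spec (o : Char) (dr dc : Int) (hd : dr * dr + dc * dc = 1) :
    ∀ (rem : List PvSeg), rem.Nodup → ∀ (r c : Int),
    ∃ k : Nat,
      (∀ j : Nat, j < k → ((r + j * dr, c + j * dc), o) ∈ rem) ∧
      ((r + k * dr, c + k * dc), o) ∉ rem ∧
      (∀ s, s ∈ pvStrip o dr dc r c rem ↔
        s ∈ rem ∧ ∀ j : Nat, j < k → s ≠ ((r + j * dr, c + j * dc), o)) := by
  intro rem hnd r c
  induction hlen : rem.length using Nat.strong_induction_on generalizing rem r c with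
  | _ n ih =>
  by_cases h : ((r, c), o) ∈ rem
  · have hlt : (rem.erase ((r, c), o)).length < n := by
      have := List.length_erase_of_mem h
      have := List.length_pos_of_mem h
      omega
    obtain ⟨k', h1, h2, h3⟩ := ih _ hlt (rem.erase ((r, c), o)) (hnd.erase _) (r + dr) (c + dc) rfl
    refine ⟨k' + 1, ?_, ?_, ?_⟩
    · intro j hj
      match j with
      | 0 => simpa using h
      | j + 1 =>
        have := h1 j (by omega)
        have hmem := (List.erase_sublist (l := rem) (a := ((r, c), o))).mem this
        convert hmem using 3 <;> push_cast <;> ring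
    · intro hmem
      have hne : ((r + (↑(k' + 1) : Int) * dr, c + (↑(k' + 1) : Int) * dc), o) ≠ ((r, c), o) := by
        intro he
        rw [Prod.mk.injEq, Prod.mk.injEq] at he
        obtain ⟨⟨h4, h5⟩, -⟩ := he
        have hk1 : ((k' : Int) + 1) ≠ 0 := by positivity
        push_cast at h4 h5
        have hdr : dr = 0 := by
          rcases mul_eq_zero.mp (show ((k' : Int) + 1) * dr = 0 by linarith) with h | h
          · exact absurd h hk1
          · exact h
        have hdc : dc = 0 := by
          rcases mul_eq_zero.mp (show ((k' : Int) + 1) * dc = 0 by linarith) with h | h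
          · exact absurd h hk1
          · exact h
        rw [hdr, hdc] at hd; norm_num at hd
      apply h2
      have : ((r + (↑(k' + 1) : Int) * dr, c + (↑(k' + 1) : Int) * dc), o) ∈ rem.erase ((r, c), o) :=
        (hnd.mem_erase_iff).mpr ⟨hne, hmem⟩
      convert this using 3 <;> push_cast <;> ring
    · intro s
      rw [pvStrip, dif_pos h]
      rw [h3 s]
      rw [hnd.mem_erase_iff]
      constructor
      · rintro ⟨⟨hne, hmem⟩, hch⟩
        refine ⟨hmem, ?_⟩
        intro j hj
        match j with
        | 0 => simpa using hne
        | j + 1 =>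
          have := hch j (by omega)
          intro he; apply this
          rw [he]; congr 2 <;> push_cast <;> ring
      · rintro ⟨hmem, hch⟩
        refine ⟨⟨by simpa using hch 0 (by omega), hmem⟩, ?_⟩
        intro j hj
        have := hch (j + 1) (by omega)
        intro he; apply this
        rw [he]; congr 2 <;> push_cast <;> ring
  · refine ⟨0, by omega, by simpa using h, ?_⟩
    intro s
    rw [pvStrip, dif_neg h]
    simp

theorem pv_run_step (o : Char) (ho : o = 'h' ∨ o = 'v') (r c dr dc : Int)
    (hd : dr * dr + dc * dc = 1)
    (hax : ∀ i : Int, pvAx o r c i = ((r + i * dr, c + i * dc), o))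
    (rest : List PvSeg) (hnd : rest.Nodup) (h0 : pvAx o r c 0 ∉ rest)
    (hor : ∀ s ∈ rest, s.2 = 'h' ∨ s.2 = 'v') :
    (pvAx o r c 0 :: rest).countP
        (fun s => decide (pvSegPred s ∉ (pvAx o r c 0 :: rest))) =
      (pvStrip o (-dr) (-dc) (r - dr) (c - dc)
        (pvStrip o dr dc (r + dr) (c + dc) rest)).countP
        (fun s => decide (pvSegPred s ∉ pvStrip o (-dr) (-dc) (r - dr) (c - dc)
          (pvStrip o dr dc (r + dr) (c + dc) rest))) + 1 := by
  set E := pvAx o r c with hE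
  set L := E 0 :: rest with hL
  set rem1 := pvStrip o dr dc (r + dr) (c + dc) rest with hrem1
  set rem2 := pvStrip o (-dr) (-dc) (r - dr) (c - dc) rem1 with hrem2
  have hndL : L.Nodup := List.nodup_cons.mpr ⟨h0, hnd⟩
  have hEinj : Function.Injective E := fun i j h => pvAx_inj h
  have hposF : ∀ j : Nat, ((r + dr + (j : Int) * dr, c + dc + (j : Int) * dc), o) = E ((j : Int) + 1) := by
    intro j; rw [hax]; congr 2 <;> ring
  have hposB : ∀ j : Nat, ((r - dr + (j : Int) * -dr, c - dc + (j : Int) * -dc), o) = E (-((j : Int) + 1)) := by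
    intro j; rw [hax]; congr 2 <;> ring
  obtain ⟨a, Ha1, Ha2, Ha3⟩ := pvStrip_spec o dr dc hd rest hnd (r + dr) (c + dc)
  have hnd1 : rem1.Nodup := (pvStrip_sublist o dr dc (r + dr) (c + dc) rest).nodup hnd
  have hd' : (-dr) * (-dr) + (-dc) * (-dc) = 1 := by rw [neg_mul_neg, neg_mul_neg]; exact hd
  obtain ⟨b, Hb1, Hb2, Hb3⟩ := pvStrip_spec o (-dr) (-dc) hd' rem1 hnd1 (r - dr) (c - dc)
  have hnd2 : rem2.Nodup := (pvStrip_sublist o (-dr) (-dc) (r - dr) (c - dc) rem1).nodup hnd1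
  -- forward chain in E-form
  have HaF : ∀ j : Nat, j < a → E ((j : Int) + 1) ∈ rest := by
    intro j hj; rw [← hposF]; exact Ha1 j hj
  have HaF2 : E ((a : Int) + 1) ∉ rest := by rw [← hposF]; exact Ha2
  have HbF : ∀ j : Nat, j < b → E (-((j : Int) + 1)) ∈ rem1 := by
    intro j hj; rw [← hposB]; exact Hb1 j hj
  have HbF2 : E (-((b : Int) + 1)) ∉ rem1 := by rw [← hposB]; exact Hb2
  have Ha3' : ∀ s, s ∈ rem1 ↔ s ∈ rest ∧ ∀ j : Nat, j < a → s ≠ E ((j : Int) + 1) := by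
    intro s; rw [Ha3 s]
    constructor
    · rintro ⟨h1, h2⟩; exact ⟨h1, fun j hj => by rw [← hposF]; exact h2 j hj⟩
    · rintro ⟨h1, h2⟩; exact ⟨h1, fun j hj => by rw [hposF]; exact h2 j hj⟩
  have Hb3' : ∀ s, s ∈ rem2 ↔ s ∈ rem1 ∧ ∀ j : Nat, j < b → s ≠ E (-((j : Int) + 1)) := by
    intro s; rw [Hb3 s]
    constructor
    · rintro ⟨h1, h2⟩; exact ⟨h1, fun j hj => by rw [← hposB]; exact h2 j hj⟩
    · rintro ⟨h1, h2⟩; exact ⟨h1, fun j hj => by rw [hposB]; exact h2 j hj⟩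
  -- membership of the removed run's elements
  have hF1 : ∀ i : Int, -(b : Int) ≤ i → i ≤ (a : Int) → E i ∈ L := by
    intro i hbi hia
    rcases lt_trichotomy i 0 with hi | hi | hi
    · have hj : ((-i - 1).toNat : Int) = -i - 1 := by omega
      have hjb : (-i - 1).toNat < b := by omega
      have := HbF _ hjb
      rw [hj] at this
      have : E i ∈ rem1 := by
        have h2 : -(-i - 1 + 1) = i := by ring
        rwa [h2] at this
      exact List.mem_cons_of_mem _ (((Ha3' _).mp this).1)
    · subst hi; exact List.mem_cons_self
    · have hj : ((i - 1).toNat : Int) = i - 1 := by omega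
      have hjb : (i - 1).toNat < a := by omega
      have := HaF _ hjb
      rw [hj] at this
      have h2 : i - 1 + 1 = i := by ring
      rw [h2] at this
      exact List.mem_cons_of_mem _ this
  have hF2 : E ((a : Int) + 1) ∉ L := by
    intro hmem
    rcases List.mem_cons.mp hmem with h | h
    · exact absurd (hEinj h) (by omega)
    · exact HaF2 h
  have hF3 : E (-((b : Int) + 1)) ∉ L := by
    intro hmem
    apply HbF2
    rcases List.mem_cons.mp hmem with h | h
    · exact absurd (hEinj h) (by omega)
    · rw [Ha3' _]
      refine ⟨h, ?_⟩
      intro j hj he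
      have := hEinj he
      omega
  -- rem2 membership characterization
  have hmem2 : ∀ s, s ∈ rem2 ↔ s ∈ rest ∧ ∀ i : Int, -(b : Int) ≤ i → i ≤ (a : Int) → s ≠ E i := by
    intro s
    rw [Hb3' s, Ha3' s]
    constructor
    · rintro ⟨⟨h1, h2⟩, h3⟩
      refine ⟨h1, ?_⟩
      intro i hbi hia he
      rcases lt_trichotomy i 0 with hi | hi | hi
      · have hj : ((-i - 1).toNat : Int) = -i - 1 := by omega
        apply h3 (-i - 1).toNat (by omega)
        rw [hj, show -(-i - 1 + 1) = i by ring]; exact he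
      · subst he; rw [hi] at h1; exact h0 h1
      · have hj : ((i - 1).toNat : Int) = i - 1 := by omega
        apply h2 (i - 1).toNat (by omega)
        rw [hj, show i - 1 + 1 = i by ring]; exact he
    · rintro ⟨h1, h2⟩
      refine ⟨⟨h1, ?_⟩, ?_⟩
      · intro j hj; exact h2 _ (by omega) (by omega)
      · intro j hj; exact h2 _ (by omega) (by omega)
  -- the run as an explicit list
  set Rlist := (PySem.List.pyRange (-(b : Int)) ((a : Int) + 1) 1).map E with hRl
  have hRnd : Rlist.Nodup := (PySem.List.nodup_pyRange_one _ _).map hEinj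
  have hRmem : ∀ s, s ∈ Rlist ↔ ∃ i : Int, -(b : Int) ≤ i ∧ i ≤ (a : Int) ∧ s = E i := by
    intro s
    simp only [hRl, List.mem_map, PySem.List.mem_pyRange_one]
    constructor
    · rintro ⟨i, ⟨h1, h2⟩, h3⟩; exact ⟨i, h1, by omega, h3.symm⟩
    · rintro ⟨i, h1, h2, h3⟩; exact ⟨i, ⟨h1, by omega⟩, h3.symm⟩
  set pL := (fun s => decide (pvSegPred s ∉ L)) with hpL
  set p2 := (fun s => decide (pvSegPred s ∉ rem2)) with hp2
  set q := (fun s => decide (s ∈ Rlist)) with hq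
  -- split L's count along membership in the run
  have hsplit : L.countP pL = (L.filter q).countP pL + (L.filter (fun s => !q s)).countP pL := by
    rw [← List.countP_append]
    exact ((List.filter_append_perm q L).countP_eq pL).symm
  -- the run contributes exactly 1
  have hperm1 : (L.filter q).Perm Rlist := by
    rw [List.perm_ext_iff_of_nodup (hndL.filter q) hRnd]
    intro s
    rw [List.mem_filter]
    constructor
    · rintro ⟨_, hs⟩; simpa [hq] using hs
    · intro hs
      refine ⟨?_, by simpa [hq] using hs⟩
      obtain ⟨i, h1, h2, h3⟩ := (hRmem s).mp hs
      exact h3 ▸ hF1 i h1 h2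
  have hrun1 : Rlist.countP pL = 1 := by
    rw [hRl, List.countP_map]
    have hcong : List.countP (pL ∘ E) (PySem.List.pyRange (-(b : Int)) ((a : Int) + 1) 1) =
        List.countP (fun i => i == -(b : Int)) (PySem.List.pyRange (-(b : Int)) ((a : Int) + 1) 1) := by
      apply List.countP_congr
      intro i hi
      rw [PySem.List.mem_pyRange_one] at hi
      simp only [Function.comp, hpL, decide_eq_true_eq, beq_iff_eq]
      rw [pvSegPred_pvAx o ho]
      constructor
      · intro hnotin
        by_contra hne
        exact hnotin (hF1 (i - 1) (by omega) (by omega))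
      · intro hib
        subst hib
        rw [show -(b : Int) - 1 = -((b : Int) + 1) by ring]
        exact hF3
    rw [hcong, ← List.count_eq_countP]
    exact List.count_eq_one_of_mem (PySem.List.nodup_pyRange_one _ _)
      (by rw [PySem.List.mem_pyRange_one]; omega)
  -- the remainder contributes the count of rem2
  have hperm2 : (L.filter (fun s => !q s)).Perm rem2 := by
    rw [List.perm_ext_iff_of_nodup (hndL.filter _) hnd2]
    intro s
    rw [List.mem_filter]
    simp only [hq, Bool.not_eq_eq_eq_not, Bool.not_true, decide_eq_false_iff_not]
    constructor
    · rintro ⟨hsL, hsR⟩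
      rcases List.mem_cons.mp hsL with h | h
      · exact absurd ((hRmem s).mpr ⟨0, by omega, by omega, h⟩) hsR
      · rw [hmem2 s]
        refine ⟨h, ?_⟩
        intro i h1 h2 he
        exact hsR ((hRmem s).mpr ⟨i, h1, h2, he⟩)
    · intro hs
      obtain ⟨h1, h2⟩ := (hmem2 s).mp hs
      refine ⟨List.mem_cons_of_mem _ h1, ?_⟩
      intro hsR
      obtain ⟨i, hi1, hi2, hi3⟩ := (hRmem s).mp hsR
      exact h2 i hi1 hi2 hi3
  have hcong2 : rem2.countP pL = rem2.countP p2 := by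
    apply List.countP_congr
    intro s hs
    simp only [hpL, hp2, decide_eq_true_eq]
    have hsrest : s ∈ rest := ((hmem2 s).mp hs).1
    constructor
    · intro hnotL hin2
      exact hnotL (List.mem_cons_of_mem _ (((hmem2 _).mp hin2).1))
    · intro hnot2 hinL
      apply hnot2
      by_contra hno
      rw [hmem2 _] at hno
      rw [hmem2 _] at hs
      push Not at hno
      have hcases : ∃ i : Int, -(b : Int) ≤ i ∧ i ≤ (a : Int) ∧ pvSegPred s = E i := by
        rcases List.mem_cons.mp hinL with h | h
        · exact ⟨0, by omega, by omega, h⟩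
        · obtain ⟨i, h1, h2, h3⟩ := hno h
          exact ⟨i, h1, h2, h3⟩
      obtain ⟨i, h1, h2, h3⟩ := hcases
      have hsor : s.2 = 'h' ∨ s.2 = 'v' := hor s hsrest
      have hsE : s = E (i + 1) := (pvSegPred_eq_pvAx_iff hsor ho).mp h3
      rcases eq_or_lt_of_le h2 with h2' | h2'
      · subst h2'
        exact hF2 (hsE ▸ List.mem_cons_of_mem _ hsrest)
      · exact hs.2 (i + 1) (by omega) (by omega) hsE
  rw [hsplit, (hperm1.countP_eq pL), hrun1, (hperm2.countP_eq pL), hcong2]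
  omega

theorem pvMergeLoop_eq : ∀ (L : List PvSeg), L.Nodup → (∀ s ∈ L, s.2 = 'h' ∨ s.2 = 'v') →
    ∀ n : Int, pvMergeLoop L n = n + (L.countP (fun s => decide (pvSegPred s ∉ L)) : Int) := by
  intro L hnd hor n
  induction hlen : L.length using Nat.strong_induction_on generalizing L n with
  | _ m ih =>
  match L, hnd, hor, hlen with
  | [], _, _, hlen => simp [pvMergeLoop]
  | cur :: rest, hnd, hor, hlen =>
    have h0 : cur ∉ rest := (List.nodup_cons.mp hnd).1
    have hndr : rest.Nodup := (List.nodup_cons.mp hnd).2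
    have horr : ∀ s ∈ rest, s.2 = 'h' ∨ s.2 = 'v' := fun s hs => hor s (List.mem_cons_of_mem _ hs)
    rcases hor cur List.mem_cons_self with hcur | hcur
    · -- horizontal
      have hcureq : pvAx 'h' cur.1.1 cur.1.2 0 = cur := by
        have heta : cur = ((cur.1.1, cur.1.2), cur.2) := rfl
        rw [heta, hcur]; simp [pvAx]
      have hax : ∀ i : Int, pvAx 'h' cur.1.1 cur.1.2 i = ((cur.1.1 + i * 0, cur.1.2 + i * 1), 'h') := by
        intro i; simp only [pvAx]; norm_num
      have hcount := pv_run_step 'h' (Or.inl rfl) cur.1.1 cur.1.2 0 1 (by norm_num) hax rest hndr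
        (by rw [hcureq]; exact h0) horr
      simp only [neg_zero, sub_zero, add_zero, hcureq] at hcount
      set rem2 := pvStrip 'h' 0 (-1) cur.1.1 (cur.1.2 - 1) (pvStrip 'h' 0 1 cur.1.1 (cur.1.2 + 1) rest) with hrem2
      have hsub : rem2.Sublist rest :=
        (pvStrip_sublist _ _ _ _ _ _).trans (pvStrip_sublist _ _ _ _ _ _)
      have hstep : pvMergeLoop (cur :: rest) n = pvMergeLoop rem2 (n + 1) := by
        rw [pvMergeLoop]
        simp [hcur]
        rfl
      rw [hstep, ih rem2.length (by have := hsub.length_le; rw [List.length_cons] at hlen; omega) rem2 (hsub.nodup hndr)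
        (fun s hs => horr s (hsub.mem hs)) (n + 1) rfl]
      rw [hcount]
      push_cast
      ring
    · -- vertical
      have hne : cur.2 ≠ 'h' := by rw [hcur]; decide
      have hcureq : pvAx 'v' cur.1.1 cur.1.2 0 = cur := by
        have heta : cur = ((cur.1.1, cur.1.2), cur.2) := rfl
        rw [heta, hcur]; simp [pvAx]
      have hax : ∀ i : Int, pvAx 'v' cur.1.1 cur.1.2 i = ((cur.1.1 + i * 1, cur.1.2 + i * 0), 'v') := by
        intro i; simp only [pvAx, if_neg (by decide : ¬('v' : Char) = 'h')]; norm_num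
      have hcount := pv_run_step 'v' (Or.inr rfl) cur.1.1 cur.1.2 1 0 (by norm_num) hax rest hndr
        (by rw [hcureq]; exact h0) horr
      simp only [neg_zero, sub_zero, add_zero, hcureq] at hcount
      set rem2 := pvStrip 'v' (-1) 0 (cur.1.1 - 1) cur.1.2 (pvStrip 'v' 1 0 (cur.1.1 + 1) cur.1.2 rest) with hrem2
      have hsub : rem2.Sublist rest :=
        (pvStrip_sublist _ _ _ _ _ _).trans (pvStrip_sublist _ _ _ _ _ _)
      have hstep : pvMergeLoop (cur :: rest) n = pvMergeLoop rem2 (n + 1) := by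
        rw [pvMergeLoop]
        simp [hne]
        rfl
      rw [hstep, ih rem2.length (by have := hsub.length_le; rw [List.length_cons] at hlen; omega) rem2 (hsub.nodup hndr)
        (fun s hs => horr s (hsub.mem hs)) (n + 1) rfl]
      rw [hcount]
      push_cast
      ring

theorem pvSegments_nodup (points : List (Int × Int)) : (pvSegments points).Nodup := by
  unfold pvSegments
  apply List.foldlRecOn points _ List.nodup_nil
  intro segs hsegs p _
  apply List.foldlRecOn pvDirs _ hsegs
  intro segs' hsegs' d _
  split
  · exact hsegs'
  · exact PySem.Set.nodup_add _ _ hsegs'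

theorem pvSegments_orient (points : List (Int × Int)) :
    ∀ s ∈ pvSegments points, s.2 = 'h' ∨ s.2 = 'v' := by
  unfold pvSegments
  apply List.foldlRecOn (motive := fun (L : List ((Int × Int) × Char)) => ∀ s ∈ L, s.2 = 'h' ∨ s.2 = 'v') points _
    (by intro s hs; simp at hs)
  intro segs hsegs p _
  apply List.foldlRecOn (motive := fun (L : List ((Int × Int) × Char)) => ∀ s ∈ L, s.2 = 'h' ∨ s.2 = 'v') pvDirs _ hsegs
  intro segs' hsegs' d _ s hs
  split at hs
  · exact hsegs' s hs
  · rcases (PySem.Set.mem_add _ _ _).mp hs with h | h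
    · exact hsegs' s h
    · subst h
      split <;> split <;> simp

theorem pv_sides_eq (points : List (Int × Int)) : pvGetSidesA points = pvGetSidesB points := by
  unfold pvGetSidesA pvGetSidesB
  rw [pvMergeLoop_eq _ (pvSegments_nodup points) (pvSegments_orient points) 0]
  rw [PySem.List.foldl_ite_add_one (fun s => pvSegPred s ∉ pvSegments points)]

theorem pvFloodFill_area (grid : List String) (rows cols : Int) (fuel : Nat) (r c : Int)
    (t : Char) (v : PySem.Set (Int × Int)) :
    (pvFloodFill grid rows cols fuel r c t v).1.1 =
      PySem.List.len (pvFloodFill grid rows cols fuel r c t v).1.2 := by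
  match fuel with
  | 0 => simp [pvFloodFill, PySem.Set.empty]
  | fuel + 1 =>
    rw [pvFloodFill]
    split
    · simp [PySem.Set.empty]
    · rfl

def pvVal (l : List (Int × Int)) : Int := (l.map (fun p => p.1 * p.2)).sum

def pvDictSum (d : PySem.Dict Char (List (Int × Int))) : Int :=
  (d.items.map (fun kv => pvVal kv.2)).sum

theorem pvFinal (d : PySem.Dict Char (List (Int × Int))) :
    d.items.foldl (fun tot kv => kv.2.foldl (fun tot p => tot + p.1 * p.2) tot) 0 = pvDictSum d := by
  rw [PySem.List.foldl_congr_mem d.items _ (fun tot kv => tot + pvVal kv.2) 0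
    (fun acc kv _ => PySem.List.foldl_add kv.2 (fun p => p.1 * p.2) acc)]
  rw [PySem.List.foldl_add]
  simp [pvDictSum]

theorem pv_sum_map_update {α : Type} [DecidableEq α] (l : List α) (k : α) (g g' : α → Int) (x : Int)
    (hnd : l.Nodup) (hk : k ∈ l) (hsame : ∀ a ∈ l, a ≠ k → g' a = g a) (hupd : g' k = g k + x) :
    (l.map g').sum = (l.map g).sum + x := by
  induction l with
  | nil => simp at hk
  | cons a t ih =>
    rcases List.mem_cons.mp hk with h | h
    · subst h
      have hknt : k ∉ t := (List.nodup_cons.mp hnd).1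
      have hmap : t.map g' = t.map g :=
        List.map_congr_left (fun b hb => hsame b (List.mem_cons_of_mem _ hb) (fun he => hknt (he ▸ hb)))
      simp [hmap, hupd]; ring
    · have ha : g' a = g a := hsame a List.mem_cons_self (fun he => (List.nodup_cons.mp hnd).1 (he ▸ h))
      simp [ha, ih (List.nodup_cons.mp hnd).2 h
        (fun b hb hbk => hsame b (List.mem_cons_of_mem _ hb) hbk)]
      ring

theorem pvDictSum_keys (d : PySem.Dict Char (List (Int × Int))) (hnd : d.keys.Nodup) :
    pvDictSum d = (d.keys.map (fun k => pvVal (d.getD k []))).sum := by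
  rw [pvDictSum, PySem.Dict.items_eq_map_keys d hnd [], List.map_map]
  rfl

theorem pvModifySum (d : PySem.Dict Char (List (Int × Int))) (k : Char) (x : Int × Int)
    (hnd : d.keys.Nodup) :
    pvDictSum (d.modify k [] (fun l => l ++ [x])) = pvDictSum d + x.1 * x.2 := by
  have hndk' : (d.modify k [] (fun l => l ++ [x])).keys.Nodup := by
    rw [PySem.Dict.keys_modify]
    exact PySem.Dict.nodup_keys_insert _ _ _ hnd
  rw [pvDictSum_keys _ hndk', pvDictSum_keys _ hnd]
  by_cases hc : d.contains k = true
  · have hkeys : (d.modify k [] (fun l => l ++ [x])).keys = d.keys := by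
      rw [PySem.Dict.keys_modify]
      exact PySem.Dict.keys_insert_of_contains d _ hc
    rw [hkeys]
    apply pv_sum_map_update d.keys k _ _ _ hnd ((PySem.Dict.contains_iff_mem_keys d k).mp hc)
    · intro a _ hak
      rw [PySem.Dict.getD_modify]
      simp [hak]
    · rw [PySem.Dict.getD_modify_self]
      simp [pvVal]
  · have hc' : d.contains k = false := by simpa using hc
    have hkeys : (d.modify k [] (fun l => l ++ [x])).keys = d.keys ++ [k] := by
      rw [PySem.Dict.keys_modify]
      exact PySem.Dict.keys_insert_of_not_contains d _ hc'
    rw [hkeys, List.map_append, List.sum_append]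
    have h1 : (d.keys.map (fun k' => pvVal ((d.modify k [] (fun l => l ++ [x])).getD k' []))).sum
        = (d.keys.map (fun k' => pvVal (d.getD k' []))).sum := by
      apply congrArg
      apply List.map_congr_left
      intro a ha
      rw [PySem.Dict.getD_modify]
      have : a ≠ k := fun he => by
        rw [he] at ha
        exact absurd ((PySem.Dict.contains_iff_mem_keys d k).mpr ha) (by simp [hc'])
      simp [this]
    rw [h1]
    simp only [List.map_cons, List.map_nil, List.sum_cons, List.sum_nil]
    rw [PySem.Dict.getD_modify_self, PySem.Dict.getD_of_not_contains d [] hc']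
    simp [pvVal]

theorem pv_foldl_rel {α σ₁ σ₂ : Type} (R : σ₁ → σ₂ → Prop) (f : σ₁ → α → σ₁) (g : σ₂ → α → σ₂)
    (l : List α) (s₁ : σ₁) (s₂ : σ₂) (h : R s₁ s₂)
    (hstep : ∀ s₁ s₂ x, R s₁ s₂ → R (f s₁ x) (g s₂ x)) :
    R (l.foldl f s₁) (l.foldl g s₂) := by
  induction l generalizing s₁ s₂ with
  | nil => exact h
  | cons a t ih => exact ih _ _ (hstep _ _ _ h)

theorem pv_cell_step (grid : List String) (rows cols : Int) (fuel : Nat) (r c : Int)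
    (sA : PySem.Set (Int × Int) × PySem.Dict Char (List (Int × Int)))
    (sB : PySem.Set (Int × Int) × Int)
    (h1 : sA.1 = sB.1) (h2 : sA.2.keys.Nodup) (h3 : sB.2 = pvDictSum sA.2) :
    (if (r, c) ∈ sA.1 then sA
     else
       let t := pvCharAt grid r c
       let res := pvFloodFill grid rows cols fuel r c t sA.1
       if 0 < res.1.1 then
         (res.2, sA.2.modify t [] (fun l => l ++ [(res.1.1, pvGetSidesA res.1.2)]))
       else (res.2, sA.2)).1 =
      (if (r, c) ∈ sB.1 then sB
       else
         let t := pvCharAt grid r c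
         let res := pvFloodFill grid rows cols fuel r c t sB.1
         (res.2, sB.2 + res.1.1 * pvGetSidesB res.1.2)).1 ∧
    (if (r, c) ∈ sA.1 then sA
     else
       let t := pvCharAt grid r c
       let res := pvFloodFill grid rows cols fuel r c t sA.1
       if 0 < res.1.1 then
         (res.2, sA.2.modify t [] (fun l => l ++ [(res.1.1, pvGetSidesA res.1.2)]))
       else (res.2, sA.2)).2.keys.Nodup ∧
    (if (r, c) ∈ sB.1 then sB
     else
       let t := pvCharAt grid r c
       let res := pvFloodFill grid rows cols fuel r c t sB.1
       (res.2, sB.2 + res.1.1 * pvGetSidesB res.1.2)).2 =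
      pvDictSum (if (r, c) ∈ sA.1 then sA
       else
         let t := pvCharAt grid r c
         let res := pvFloodFill grid rows cols fuel r c t sA.1
         if 0 < res.1.1 then
           (res.2, sA.2.modify t [] (fun l => l ++ [(res.1.1, pvGetSidesA res.1.2)]))
         else (res.2, sA.2)).2 := by
  rw [← h1]
  by_cases hm : (r, c) ∈ sA.1
  · simp only [if_pos hm]
    exact ⟨h1, h2, h3⟩
  · simp only [if_neg hm]
    set res := pvFloodFill grid rows cols fuel r c (pvCharAt grid r c) sA.1 with hres
    by_cases hpos : 0 < res.1.1
    · simp only [if_pos hpos]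
      refine ⟨trivial, ?_, ?_⟩
      · rw [PySem.Dict.keys_modify]
        exact PySem.Dict.nodup_keys_insert _ _ _ h2
      · rw [pvModifySum _ _ _ h2, pv_sides_eq, h3]
    · simp only [if_neg hpos]
      refine ⟨trivial, h2, ?_⟩
      have harea : res.1.1 = PySem.List.len res.1.2 := pvFloodFill_area grid rows cols fuel r c _ sA.1
      have hz : res.1.1 = 0 := by
        rw [harea] at hpos ⊢
        rw [PySem.List.len_eq] at hpos ⊢
        omega
      rw [hz, h3]
      ring

theorem pv_main (grid : List String) : find_regions_by_sides grid = find_regions_by_sides_alt grid := by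
  unfold find_regions_by_sides find_regions_by_sides_alt
  dsimp only
  rw [pvFinal]
  refine ((pv_foldl_rel
    (R := fun (sA : PySem.Set (Int × Int) × PySem.Dict Char (List (Int × Int)))
            (sB : PySem.Set (Int × Int) × Int) =>
          sA.1 = sB.1 ∧ sA.2.keys.Nodup ∧ sB.2 = pvDictSum sA.2)
    _ _ _ _ _ ?hini ?hstep).2.2).symm
  case hini =>
    refine ⟨rfl, ?_, ?_⟩ <;> simp [PySem.Dict.empty, PySem.Dict.keys, pvDictSum]
  case hstep =>
    intro sA sB x hR
    exact pv_foldl_rel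
      (R := fun (sA : PySem.Set (Int × Int) × PySem.Dict Char (List (Int × Int)))
              (sB : PySem.Set (Int × Int) × Int) =>
            sA.1 = sB.1 ∧ sA.2.keys.Nodup ∧ sB.2 = pvDictSum sA.2)
      _ _ _ _ _ hR
      (fun sA' sB' c hR' =>
        pv_cell_step grid _ _ _ _ c sA' sB' hR'.1 hR'.2.1 hR'.2.2)

-- ===== VERDICT (by name: the statement is the Claim_ definition above) =====
theorem find_regions_by_sides_spec : Claim_equal_find_regions_by_sides := by
  intro grid _ _
  unfold Spec_find_regions_by_sides
  exact pv_main grid
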